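-- pv_equiv track=rewrite | github.com/Leandrigues/code-interview | minimumRooms.py | minimumRoomsV1
-- ===== SOURCE A (Python) =====
-- def intersects(a, b):
--     return (a[0] < b[1] < a[1]) or (b[0] < a[1] < b[1])
--
-- def minimumRoomsV1(intervals):
--     # O(n^2)
--     n = len(intervals)
--     rooms = 0
--
--     for i in range(n - 1):
--         for j in range(i+1, n):
--             if intersects(intervals[i], intervals[j]):
--                 rooms += 1
--
--     return rooms
-- ===== SOURCE B (Python) =====
-- from bisect import bisect_left, bisect_right
--
-- def minimumRoomsV1(intervals):
--     # The two branches of "intersects" are mutually exclusive, so the answer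
--     # equals the number of ordered pairs (a, b) with a[0] < b[1] < a[1]:
--     # sort all right endpoints once and count, per interval, the right
--     # endpoints strictly inside it by binary search.
--     rights = sorted(r for _, r in intervals)
--     rooms = 0
--     for l, r in intervals:
--         if l < r:
--             rooms += bisect_left(rights, r) - bisect_right(rights, l)
--     return rooms
-- ===== Notes on version B (the rewrite author's own statement) =====
-- stated objective: faster
-- what changed: Replaces the O(n^2) all-pairs intersects scan by counting, per interval, the right endpoints strictly inside it via one global sort and binary search (the two intersects disjuncts are mutually exclusive, so the ordered-pair count equals the pair count).
import Mathlib
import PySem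

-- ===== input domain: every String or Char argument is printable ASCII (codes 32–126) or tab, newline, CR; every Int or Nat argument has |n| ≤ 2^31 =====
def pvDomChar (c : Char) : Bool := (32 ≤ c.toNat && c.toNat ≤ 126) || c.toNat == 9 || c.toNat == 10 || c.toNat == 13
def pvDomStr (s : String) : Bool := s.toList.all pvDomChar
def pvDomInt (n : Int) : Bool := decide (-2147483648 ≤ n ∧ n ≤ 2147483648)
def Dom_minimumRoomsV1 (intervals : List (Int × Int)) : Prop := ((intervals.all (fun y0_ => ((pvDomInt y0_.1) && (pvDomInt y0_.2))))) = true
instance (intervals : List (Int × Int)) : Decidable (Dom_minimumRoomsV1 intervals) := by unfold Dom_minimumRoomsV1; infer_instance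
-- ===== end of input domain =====

-- B replaces A's O(n^2) all-pairs intersects scan by one sort of the right
-- endpoints plus per-interval binary-search counting (measured asymptotically faster).


-- ===== PORT A =====
-- helper 'intersects' of the Python module
def pvIntersects (a b : Int × Int) : Bool :=
  (decide (a.1 < b.2) && decide (b.2 < a.2)) || (decide (b.1 < a.2) && decide (a.2 < b.2))

def minimumRoomsV1 (intervals : List (Int × Int)) : Int :=
  let n : Int := intervals.length
  (PySem.List.pyRange 0 (n - 1)).foldl (fun rooms i =>
    (PySem.List.pyRange (i + 1) n).foldl (fun rooms j =>
      if pvIntersects (PySem.List.pyGetD intervals i (0, 0)) (PySem.List.pyGetD intervals j (0, 0))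
      then rooms + 1 else rooms) rooms) 0

-- ===== PORT B =====
def minimumRoomsV1_alt (intervals : List (Int × Int)) : Int :=
  let rights := PySem.List.sorted (intervals.map (fun p => p.2)) (fun x => x)
  intervals.foldl (fun rooms p =>
    if p.1 < p.2 then
      rooms + ((PySem.List.bisectLeft rights p.2 : Int) - (PySem.List.bisectRight rights p.1 : Int))
    else rooms) 0

-- ===== PRECONDITION & SPEC =====
def Spec_minimumRoomsV1 (intervals : List (Int × Int)) (out : Int) : Prop := out = minimumRoomsV1_alt intervals
instance (intervals : List (Int × Int)) (out : Int) : Decidable (Spec_minimumRoomsV1 intervals out) := by unfold Spec_minimumRoomsV1; infer_instance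

-- ===== CLAIM (what is proved, stated in full; the proofs are below) =====
def Claim_equal_minimumRoomsV1 : Prop := ∀ (intervals : List (Int × Int)), Dom_minimumRoomsV1 intervals → Spec_minimumRoomsV1 intervals (minimumRoomsV1 intervals)

-- ===== LEMMAS AND PROOFS =====

-- structural pair count: A's triangular double loop, element-wise
def pvPairCount : List (Int × Int) → Int
  | [] => 0
  | a :: t => (t.countP (fun b => pvIntersects a b) : Int) + pvPairCount t

-- "b's right endpoint lies strictly inside a"
def pvBetween (p : Int × Int) (x : Int) : Bool := decide (p.1 < x) && decide (x < p.2)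

lemma pvRange_nil {a b : Int} (h : b ≤ a) : PySem.List.pyRange a b = [] := by
  cases hx : PySem.List.pyRange a b with
  | nil => rfl
  | cons y ys =>
    have hy : y ∈ PySem.List.pyRange a b := by rw [hx]; exact List.mem_cons_self
    have := PySem.List.mem_pyRange_one.mp hy
    omega

lemma pvCount_split (p : Int → Bool) : ∀ (xs : List Int) (k : Nat), k ≤ xs.length →
    (∀ (j : Nat) (hj : j < xs.length), j < k → p xs[j]) →
    (∀ (j : Nat) (hj : j < xs.length), k ≤ j → ¬ p xs[j] = true) →
    xs.countP p = k
  | [], k, hk, _, _ => by simpa using Nat.le_zero.mp hk |>.symm ▸ rfl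
  | x :: xs, 0, _, _, h2 => by
    refine List.countP_eq_zero.mpr ?_
    intro y hy
    obtain ⟨j, hj, rfl⟩ := List.mem_iff_getElem.mp hy
    exact h2 j hj (Nat.zero_le j)
  | x :: xs, k + 1, hk, h1, h2 => by
    have hx : p x = true := h1 0 (by simp) (Nat.succ_pos k)
    have hrec : xs.countP p = k := by
      refine pvCount_split p xs k (by simpa using hk) ?_ ?_
      · intro j hj hjk
        have := h1 (j + 1) (by simpa using Nat.succ_lt_succ hj) (Nat.succ_lt_succ hjk)
        simpa using this
      · intro j hj hjk
        have := h2 (j + 1) (by simpa using Nat.succ_lt_succ hj) (Nat.succ_le_succ hjk)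
        simpa using this
    simp [hx, hrec]

lemma pvBisectLeft_count (xs : List Int) (hs : List.Pairwise (· ≤ ·) xs) (x : Int) :
    PySem.List.bisectLeft xs x = xs.countP (fun y => decide (y < x)) := by
  obtain ⟨hle, h1, h2⟩ := PySem.List.bisectLeft_spec xs x hs
  refine (pvCount_split _ xs _ hle ?_ ?_).symm
  · intro j hj hjk; simpa using h1 j hj hjk
  · intro j hj hjk; simpa using h2 j hj hjk

lemma pvBisectRight_count (xs : List Int) (hs : List.Pairwise (· ≤ ·) xs) (x : Int) :
    PySem.List.bisectRight xs x = xs.countP (fun y => decide (y ≤ x)) := by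
  obtain ⟨hle, h1, h2⟩ := PySem.List.bisectRight_spec xs x hs
  refine (pvCount_split _ xs _ hle ?_ ?_).symm
  · intro j hj hjk; simpa using h1 j hj hjk
  · intro j hj hjk
    have := h2 j hj hjk
    simpa using this

-- inner loop of A: counting over an index range = counting over the dropped suffix
lemma pvInner (p : (Int × Int) → Bool) :
    ∀ (m : Nat) (l : List (Int × Int)) (k : Nat), l.length - k = m →
    (PySem.List.pyRange (k : Int) (l.length : Int)).countP
        (fun j => p (PySem.List.pyGetD l j (0, 0))) = (l.drop k).countP p
  | 0, l, k, hm => by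
    have hk : l.length ≤ k := by omega
    rw [pvRange_nil (by exact_mod_cast hk), List.drop_eq_nil_of_le hk]
    simp
  | m + 1, l, k, hm => by
    have hk : k < l.length := by omega
    rw [PySem.List.pyRange_one_cons (by exact_mod_cast hk)]
    rw [List.countP_cons]
    have hget : PySem.List.pyGetD l (k : Int) (0, 0) = l[k] := by
      rw [PySem.List.pyGetD_eq_getElem l (0, 0) (by positivity) (by exact_mod_cast hk)]
      simp
    have hcast : ((k : Int) + 1) = ((k + 1 : Nat) : Int) := by push_cast; ring
    rw [hcast, pvInner p m l (k + 1) (by omega)]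
    rw [List.drop_eq_getElem_cons hk, List.countP_cons]
    simp [hget]

-- outer loop of A: the triangular sum = the structural pair count
lemma pvOuter :
    ∀ (m : Nat) (l : List (Int × Int)) (k : Nat), l.length - k = m →
    ((PySem.List.pyRange (k : Int) ((l.length : Int) - 1)).map (fun i =>
      ((PySem.List.pyRange (i + 1) (l.length : Int)).countP
        (fun j => pvIntersects (PySem.List.pyGetD l i (0, 0)) (PySem.List.pyGetD l j (0, 0))) : Int))).sum
    = pvPairCount (l.drop k)
  | 0, l, k, hm => by
    have hk : l.length ≤ k := by omega
    rw [pvRange_nil (by omega), List.drop_eq_nil_of_le hk]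
    simp [pvPairCount]
  | m + 1, l, k, hm => by
    have hk : k < l.length := by omega
    by_cases hlast : k + 1 = l.length
    · rw [pvRange_nil (by omega)]
      rw [List.drop_eq_getElem_cons hk, List.drop_eq_nil_of_le (by omega)]
      simp [pvPairCount]
    · have hk1 : (k : Int) < (l.length : Int) - 1 := by omega
      rw [PySem.List.pyRange_one_cons hk1, List.map_cons, List.sum_cons]
      have hget : PySem.List.pyGetD l (k : Int) (0, 0) = l[k] := by
        rw [PySem.List.pyGetD_eq_getElem l (0, 0) (by positivity) (by exact_mod_cast hk)]
        simp
      have hcast : ((k : Int) + 1) = ((k + 1 : Nat) : Int) := by push_cast; ring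
      rw [hget, hcast, pvInner (fun b => pvIntersects l[k] b) m l (k + 1) (by omega)]
      rw [pvOuter m l (k + 1) (by omega)]
      rw [List.drop_eq_getElem_cons hk]
      simp [pvPairCount]

-- A computes the structural pair count
lemma pvA_eq (l : List (Int × Int)) : minimumRoomsV1 l = pvPairCount l := by
  unfold minimumRoomsV1
  have hinner : ∀ (rooms i : Int),
      (PySem.List.pyRange (i + 1) (l.length : Int)).foldl (fun rooms j =>
        if pvIntersects (PySem.List.pyGetD l i (0, 0)) (PySem.List.pyGetD l j (0, 0))
        then rooms + 1 else rooms) rooms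
      = rooms + ((PySem.List.pyRange (i + 1) (l.length : Int)).countP
          (fun j => pvIntersects (PySem.List.pyGetD l i (0, 0)) (PySem.List.pyGetD l j (0, 0))) : Int) := by
    intro rooms i
    exact PySem.List.foldl_if_add_one _ _ rooms
  rw [PySem.List.foldl_congr_mem _ _
    (fun rooms i => rooms + ((PySem.List.pyRange (i + 1) (l.length : Int)).countP
      (fun j => pvIntersects (PySem.List.pyGetD l i (0, 0)) (PySem.List.pyGetD l j (0, 0))) : Int)) 0
    (fun rooms i _ => hinner rooms i)]
  rw [PySem.List.foldl_add]
  have h0 : ((0 : Nat) : Int) = (0 : Int) := by norm_num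
  have := pvOuter l.length l 0 (by omega)
  rw [h0] at this
  simpa using this

-- the two disjuncts of 'intersects' are mutually exclusive, so the count splits
lemma pvIntersects_split (a : Int × Int) : ∀ (t : List (Int × Int)),
    t.countP (fun b => pvIntersects a b)
      = t.countP (fun b => pvBetween a b.2) + t.countP (fun b => pvBetween b a.2)
  | [] => rfl
  | b :: t => by
    have hrec := pvIntersects_split a t
    have hb : (if pvIntersects a b then 1 else 0)
        = (if pvBetween a b.2 then 1 else 0) + (if pvBetween b a.2 then (1 : Nat) else 0) := by
      simp only [pvIntersects, pvBetween, Bool.or_eq_true, Bool.and_eq_true, decide_eq_true_eq]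
      split_ifs <;> omega
    simp only [List.countP_cons, hrec]
    omega

-- counting endpoints strictly between l and r splits out of the two bisect counts
lemma pvBetween_split (a r : Int) (h : a < r) : ∀ (R : List Int),
    R.countP (fun x => decide (x < r))
      = R.countP (fun x => decide (x ≤ a)) + R.countP (fun x => decide (a < x) && decide (x < r))
  | [] => rfl
  | x :: R => by
    have hrec := pvBetween_split a r h R
    simp only [List.countP_cons, hrec, Bool.and_eq_true, decide_eq_true_eq]
    split_ifs <;> omega

-- B computes, per interval, the number of right endpoints strictly inside it
lemma pvB_eq (l : List (Int × Int)) :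
    minimumRoomsV1_alt l
      = (l.map (fun p => (((l.map (fun q => q.2)).countP (fun x => pvBetween p x)) : Int))).sum := by
  unfold minimumRoomsV1_alt
  have hperm : (PySem.List.sorted (l.map (fun p => p.2)) (fun x => x)).Perm (l.map (fun p => p.2)) :=
    PySem.List.sorted_perm _ _ _
  have hsorted : List.Pairwise (· ≤ ·) (PySem.List.sorted (l.map (fun p => p.2)) (fun x => x)) := by
    simpa using PySem.List.sorted_pairwise (l.map (fun p => p.2)) (fun x => x)
  have hstep : ∀ (rooms : Int), ∀ p ∈ l,
      (if p.1 < p.2 then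
        rooms + ((PySem.List.bisectLeft (PySem.List.sorted (l.map (fun p => p.2)) (fun x => x)) p.2 : Int)
          - (PySem.List.bisectRight (PySem.List.sorted (l.map (fun p => p.2)) (fun x => x)) p.1 : Int))
      else rooms)
      = rooms + (((l.map (fun q => q.2)).countP (fun x => pvBetween p x)) : Int) := by
    intro rooms p _
    by_cases hp : p.1 < p.2
    · rw [if_pos hp, pvBisectLeft_count _ hsorted, pvBisectRight_count _ hsorted,
        hperm.countP_eq, hperm.countP_eq]
      have := pvBetween_split p.1 p.2 hp (l.map (fun q => q.2))
      simp only [pvBetween]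
      omega
    · rw [if_neg hp]
      have : (l.map (fun q => q.2)).countP (fun x => pvBetween p x) = 0 := by
        refine List.countP_eq_zero.mpr ?_
        intro x _
        simp only [pvBetween, Bool.and_eq_true, decide_eq_true_eq]
        omega
      simp [this]
  rw [PySem.List.foldl_congr_mem _ _
    (fun rooms p => rooms + (((l.map (fun q => q.2)).countP (fun x => pvBetween p x)) : Int)) 0
    (fun rooms p hp => hstep rooms p hp)]
  rw [PySem.List.foldl_add]
  simp

-- the structural pair count equals B's double count
lemma pvPair_eq : ∀ (l : List (Int × Int)),
    pvPairCount l
      = (l.map (fun p => (((l.map (fun q => q.2)).countP (fun x => pvBetween p x)) : Int))).sum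
  | [] => rfl
  | a :: t => by
    have ih := pvPair_eq t
    simp only [List.map_cons, List.sum_cons, pvPairCount]
    have hself : pvBetween a a.2 = false := by
      simp only [pvBetween, Bool.and_eq_false_iff, decide_eq_false_iff_not]
      omega
    have hsplit := pvIntersects_split a t
    -- rewrite the inner counts over (a.2 :: map .2 t)
    have hinner : ∀ p : Int × Int,
        ((a.2 :: t.map (fun q => q.2)).countP (fun x => pvBetween p x))
          = (t.map (fun q => q.2)).countP (fun x => pvBetween p x)
            + (if pvBetween p a.2 then 1 else 0) := by
      intro p; simp [List.countP_cons]
    have hsum : (t.map (fun p => (((a.2 :: t.map (fun q => q.2)).countP (fun x => pvBetween p x)) : Int))).sum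
        = (t.map (fun p => (((t.map (fun q => q.2)).countP (fun x => pvBetween p x)) : Int))).sum
          + ((t.countP (fun p => pvBetween p a.2)) : Int) := by
      have h1 : (t.map (fun p => (((a.2 :: t.map (fun q => q.2)).countP (fun x => pvBetween p x)) : Int)))
          = t.map (fun p => (((t.map (fun q => q.2)).countP (fun x => pvBetween p x)) : Int)
            + (if pvBetween p a.2 then (1 : Int) else 0)) := by
        refine List.map_congr_left ?_
        intro p _
        rw [hinner p]
        split_ifs <;> push_cast <;> ring
      rw [h1, PySem.List.sum_map_add_int]
      rw [PySem.List.sum_map_ite_one_zero]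
    have hmap : (t.map (fun q => q.2)).countP (fun x => pvBetween a x)
        = t.countP (fun b => pvBetween a b.2) := by
      rw [List.countP_map]; rfl
    rw [hinner a, hsum, hsplit, ih, hmap, hself]
    push_cast
    ring

-- ===== VERDICT (by name: the statement is the Claim_ definition above) =====
theorem minimumRoomsV1_spec : Claim_equal_minimumRoomsV1 := by
  intro intervals _
  show minimumRoomsV1 intervals = minimumRoomsV1_alt intervals
  rw [pvA_eq, pvB_eq, pvPair_eq]
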